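-- pv_equiv track=rewrite | github.com/psychias/evaluation_schema- | scripts/audit_records.py | infer_eval_rel
-- ===== SOURCE A (Python) =====
-- def infer_eval_rel(model_developer: str, source_org: str) -> str:
--     """first_party if developer matches source org, else third_party."""
--     if not model_developer or model_developer == "unknown":
--         return "third_party"
--
--     md = model_developer.lower()
--     so = source_org.lower()
--
--     # Direct match
--     if md == so:
--         return "first_party"
--
--     # Known org equivalences
--     org_groups = [
--         {"google", "deepmind", "google deepmind", "google brain"},
--         {"meta", "meta ai", "meta-llama", "facebook"},
--         {"microsoft", "msft"},
--         {"openai"},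
--         {"mistralai", "mistral ai"},
--         {"allenai", "allen ai", "allen institute"},
--         {"nvidia"},
--         {"databricks"},
--         {"mosaicml"},
--         {"ai21labs", "ai21"},
--         {"deepseek-ai", "deepseek ai"},
--         {"tiiuae", "tii uae", "tii"},
--         {"bigscience"},
--         {"eleutherai", "eleuther ai"},
--         {"huggingface", "hf"},
--         {"01-ai", "01.ai"},
--         {"qwen", "alibaba group", "alibaba"},
--         {"cohere", "cohereforai"},
--         {"anthropic"},
--         {"upstage"},
--         {"internlm", "shanghai ai lab"},
--         {"baichuan-inc", "baichuan inc"},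
--         {"bigcode"},
--     ]
--
--     for group in org_groups:
--         if any(md in g for g in group) and any(so in g for g in group):
--             return "first_party"
--
--     # Check substring match with org groups
--     for group in org_groups:
--         md_match = any(g in md or md in g for g in group)
--         so_match = any(g in so or so in g for g in group)
--         if md_match and so_match:
--             return "first_party"
--
--     return "third_party"
-- ===== SOURCE B (Python) =====
-- ORG_GROUPS = [
--     ["google", "deepmind", "google deepmind", "google brain"],
--     ["meta", "meta ai", "meta-llama", "facebook"],
--     ["microsoft", "msft"],
--     ["openai"],
--     ["mistralai", "mistral ai"],
--     ["allenai", "allen ai", "allen institute"],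
--     ["nvidia"],
--     ["databricks"],
--     ["mosaicml"],
--     ["ai21labs", "ai21"],
--     ["deepseek-ai", "deepseek ai"],
--     ["tiiuae", "tii uae", "tii"],
--     ["bigscience"],
--     ["eleutherai", "eleuther ai"],
--     ["huggingface", "hf"],
--     ["01-ai", "01.ai"],
--     ["qwen", "alibaba group", "alibaba"],
--     ["cohere", "cohereforai"],
--     ["anthropic"],
--     ["upstage"],
--     ["internlm", "shanghai ai lab"],
--     ["baichuan-inc", "baichuan inc"],
--     ["bigcode"],
-- ]
--
--
-- def _matched_groups(name: str) -> set:
--     """Indices of org groups that name matches via the bidirectional substring test."""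
--     return {i for i, group in enumerate(ORG_GROUPS)
--             if any(g in name or name in g for g in group)}
--
--
-- def infer_eval_rel(model_developer: str, source_org: str) -> str:
--     """first_party if developer matches source org, else third_party."""
--     if not model_developer or model_developer == "unknown":
--         return "third_party"
--     md = model_developer.lower()
--     so = source_org.lower()
--     if md == so:
--         return "first_party"
--     return "first_party" if _matched_groups(md) & _matched_groups(so) else "third_party"
-- ===== Notes on version B (the rewrite author's own statement) =====
-- stated objective: simpler
-- what changed: Replaced A's two sequential scans over the org groups (one-directional then bidirectional substring tests) with a single helper that computes the set of group indices a name matches bidirectionally, called once per argument, deciding first_party by set intersection; this works because the first loop's condition implies the second's.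
import Mathlib
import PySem

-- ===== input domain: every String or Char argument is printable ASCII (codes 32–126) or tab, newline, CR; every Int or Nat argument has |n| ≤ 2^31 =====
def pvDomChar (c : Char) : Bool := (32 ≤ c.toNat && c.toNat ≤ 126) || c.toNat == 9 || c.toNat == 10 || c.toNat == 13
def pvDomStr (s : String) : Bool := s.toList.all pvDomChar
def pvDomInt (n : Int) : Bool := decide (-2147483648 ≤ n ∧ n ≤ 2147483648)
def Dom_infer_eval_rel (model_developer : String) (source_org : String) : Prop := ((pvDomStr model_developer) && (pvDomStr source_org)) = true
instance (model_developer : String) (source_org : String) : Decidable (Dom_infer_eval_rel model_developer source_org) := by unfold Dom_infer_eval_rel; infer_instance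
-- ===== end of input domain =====

-- B collapses A's two sequential scans over the org groups into one matched-index-set
-- computation per argument plus a set intersection (objective: simpler).

-- the org-group table, shared module-level data of both programs
def pvOrgGroups : List (List String) :=
  [["google", "deepmind", "google deepmind", "google brain"],
   ["meta", "meta ai", "meta-llama", "facebook"],
   ["microsoft", "msft"],
   ["openai"],
   ["mistralai", "mistral ai"],
   ["allenai", "allen ai", "allen institute"],
   ["nvidia"],
   ["databricks"],
   ["mosaicml"],
   ["ai21labs", "ai21"],
   ["deepseek-ai", "deepseek ai"],
   ["tiiuae", "tii uae", "tii"],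
   ["bigscience"],
   ["eleutherai", "eleuther ai"],
   ["huggingface", "hf"],
   ["01-ai", "01.ai"],
   ["qwen", "alibaba group", "alibaba"],
   ["cohere", "cohereforai"],
   ["anthropic"],
   ["upstage"],
   ["internlm", "shanghai ai lab"],
   ["baichuan-inc", "baichuan inc"],
   ["bigcode"]]

-- ===== PORT A =====
-- 'for group in groups: if cond: return "first_party"' is rendered as List.any (first hit = existence)
def infer_eval_rel (model_developer : String) (source_org : String) : String :=
  if model_developer = "" || model_developer = "unknown" then "third_party"
  else
    let md := PySem.Str.lower model_developer
    let so := PySem.Str.lower source_org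
    if md = so then "first_party"
    else
      let org_groups := pvOrgGroups
      if org_groups.any (fun group =>
            group.any (fun g => PySem.Str.isIn md g) && group.any (fun g => PySem.Str.isIn so g))
      then "first_party"
      else if org_groups.any (fun group =>
            let md_match := group.any (fun g => PySem.Str.isIn g md || PySem.Str.isIn md g)
            let so_match := group.any (fun g => PySem.Str.isIn g so || PySem.Str.isIn so g)
            md_match && so_match)
      then "first_party"
      else "third_party"

-- ===== PORT B =====
-- _matched_groups: the set of group indices matched bidirectionally (indices are distinct,
-- so the Python set is this list of distinct Ints)
def pvMatchedGroups (name : String) : List Int :=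
  ((PySem.List.enumerate pvOrgGroups 0).filter
    (fun p => p.2.any (fun g => PySem.Str.isIn g name || PySem.Str.isIn name g))).map (·.1)

-- nonempty set intersection = some md-index occurs among so's indices
def infer_eval_rel_alt (model_developer : String) (source_org : String) : String :=
  if model_developer = "" || model_developer = "unknown" then "third_party"
  else
    let md := PySem.Str.lower model_developer
    let so := PySem.Str.lower source_org
    if md = so then "first_party"
    else
      if (pvMatchedGroups md).any (fun i => (pvMatchedGroups so).contains i)
      then "first_party"
      else "third_party"

-- ===== PRECONDITION & SPEC =====
def Spec_infer_eval_rel (model_developer : String) (source_org : String) (out : String) : Prop := out = infer_eval_rel_alt model_developer source_org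
instance (model_developer : String) (source_org : String) (out : String) : Decidable (Spec_infer_eval_rel model_developer source_org out) := by unfold Spec_infer_eval_rel; infer_instance

-- ===== CLAIM (what is proved, stated in full; the proofs are below) =====
def Claim_equal_infer_eval_rel : Prop := ∀ (model_developer : String) (source_org : String), Dom_infer_eval_rel model_developer source_org → Spec_infer_eval_rel model_developer source_org (infer_eval_rel model_developer source_org)

-- ===== LEMMAS AND PROOFS =====

-- generalized matched-index list over an arbitrary group list and start index
def pvMatchedFrom (gs : List (List String)) (s : Int) (name : String) : List Int :=
  ((PySem.List.enumerate gs s).filter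
    (fun p => p.2.any (fun g => PySem.Str.isIn g name || PySem.Str.isIn name g))).map (·.1)

lemma pvMatchedGroups_eq (name : String) :
    pvMatchedGroups name = pvMatchedFrom pvOrgGroups 0 name := rfl

lemma pvMatchedFrom_nil (s : Int) (name : String) : pvMatchedFrom [] s name = [] := rfl

lemma pvMatchedFrom_cons (g : List String) (gs : List (List String)) (s : Int) (name : String) :
    pvMatchedFrom (g :: gs) s name =
      if g.any (fun x => PySem.Str.isIn x name || PySem.Str.isIn name x)
      then s :: pvMatchedFrom gs (s + 1) name
      else pvMatchedFrom gs (s + 1) name := by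
  simp only [pvMatchedFrom, PySem.List.enumerate_cons, List.filter_cons]
  split <;> simp

lemma pvMatchedFrom_lb (gs : List (List String)) (s : Int) (name : String) :
    ∀ i ∈ pvMatchedFrom gs s name, s ≤ i := by
  induction gs generalizing s with
  | nil => simp [pvMatchedFrom_nil]
  | cons g gs ih =>
    intro i hi
    rw [pvMatchedFrom_cons] at hi
    split at hi
    · rcases List.mem_cons.1 hi with h | h
      · omega
      · have := ih (s + 1) i h; omega
    · have := ih (s + 1) i hi; omega

-- the intersection test equals A's second-loop existence test, for any group list
lemma pv_key (md so : String) (gs : List (List String)) (s : Int) :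
    (pvMatchedFrom gs s md).any (fun i => (pvMatchedFrom gs s so).contains i) =
      gs.any (fun group =>
        group.any (fun g => PySem.Str.isIn g md || PySem.Str.isIn md g) &&
        group.any (fun g => PySem.Str.isIn g so || PySem.Str.isIn so g)) := by
  induction gs generalizing s with
  | nil => simp [pvMatchedFrom_nil]
  | cons g gs ih =>
    rw [pvMatchedFrom_cons, pvMatchedFrom_cons, List.any_cons]
    have hcongr : (pvMatchedFrom gs (s + 1) md).any
          (fun i => (s :: pvMatchedFrom gs (s + 1) so).contains i) =
        (pvMatchedFrom gs (s + 1) md).any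
          (fun i => (pvMatchedFrom gs (s + 1) so).contains i) := by
      apply Bool.eq_iff_iff.mpr
      simp only [List.any_eq_true, List.contains_cons, Bool.or_eq_true, beq_iff_eq,
        List.contains_iff_mem]
      constructor
      · rintro ⟨i, hi, hc | hc⟩
        · exact absurd hc (by have := pvMatchedFrom_lb gs (s + 1) md i hi; omega)
        · exact ⟨i, hi, hc⟩
      · rintro ⟨i, hi, hc⟩
        exact ⟨i, hi, Or.inr hc⟩
    by_cases hmd : g.any (fun x => PySem.Str.isIn x md || PySem.Str.isIn md x) <;>
      by_cases hso : g.any (fun x => PySem.Str.isIn x so || PySem.Str.isIn so x)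
    · rw [if_pos hmd, if_pos hso]
      have h1 : ((s :: pvMatchedFrom gs (s + 1) so).contains s) = true := by
        simp
      rw [List.any_cons, h1, Bool.true_or]
      symm
      simp only [Bool.or_eq_true, Bool.and_eq_true]
      exact Or.inl ⟨hmd, hso⟩
    · rw [if_pos hmd, if_neg hso]
      have hYs : ((pvMatchedFrom gs (s + 1) so).contains s) = false := by
        rw [Bool.eq_false_iff]
        intro h
        have hmem : s ∈ pvMatchedFrom gs (s + 1) so := by simpa using h
        have := pvMatchedFrom_lb gs (s + 1) so s hmem
        omega
      rw [List.any_cons, hYs]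
      simp only [Bool.false_or, hso, Bool.and_false, Bool.false_or]
      exact ih (s + 1)
    · rw [if_neg hmd, if_pos hso]
      rw [hcongr]
      simp only [hmd, Bool.false_and, Bool.false_or]
      exact ih (s + 1)
    · rw [if_neg hmd, if_neg hso]
      simp only [hmd, Bool.false_and, Bool.false_or]
      exact ih (s + 1)

-- A's first loop's condition implies its second's (md in g gives md in g ∨ g in md)
lemma pv_loop1_imp_loop2 (md so : String) (gs : List (List String))
    (h : gs.any (fun group =>
        group.any (fun g => PySem.Str.isIn md g) && group.any (fun g => PySem.Str.isIn so g)) = true) :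
    gs.any (fun group =>
        group.any (fun g => PySem.Str.isIn g md || PySem.Str.isIn md g) &&
        group.any (fun g => PySem.Str.isIn g so || PySem.Str.isIn so g)) = true := by
  simp only [List.any_eq_true, Bool.and_eq_true] at h ⊢
  obtain ⟨grp, hgrp, ⟨g1, hg1, h1⟩, ⟨g2, hg2, h2⟩⟩ := h
  refine ⟨grp, hgrp, ⟨g1, hg1, ?_⟩, ⟨g2, hg2, ?_⟩⟩
  · simp only [Bool.or_eq_true]; right; simpa using h1
  · simp only [Bool.or_eq_true]; right; simpa using h2

-- ===== VERDICT (by name: the statement is the Claim_ definition above) =====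
theorem infer_eval_rel_spec : Claim_equal_infer_eval_rel := by
  intro md0 so0 _
  unfold Spec_infer_eval_rel infer_eval_rel infer_eval_rel_alt
  simp only []
  split
  · rfl
  · split
    · rfl
    · rw [pvMatchedGroups_eq, pvMatchedGroups_eq, pv_key]
      by_cases h1 : pvOrgGroups.any (fun group =>
          group.any (fun g => PySem.Str.isIn (PySem.Str.lower md0) g) &&
          group.any (fun g => PySem.Str.isIn (PySem.Str.lower so0) g))
      · rw [if_pos h1, if_pos (pv_loop1_imp_loop2 _ _ _ h1)]
      · rw [if_neg h1]
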